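-- pv_equiv track=rewrite | github.com/middnight/python-ds | divideAndConquer/numberFactor.py | numberFactor
-- ===== SOURCE A (Python) =====
-- def numberFactor(N):
--     if(N==0 or N==1 or N==2):
--         return 1
--     elif(N==3):
--         return 2
--     c1=numberFactor(N-1)
--     c2=numberFactor(N-3)
--     c3=numberFactor(N-4)
--
--     return c1+c2+c3
-- ===== SOURCE B (Python) =====
-- def numberFactor(N):
--     if N <= 2:
--         return 1
--     if N == 3:
--         return 2
--     a, b, c, d = 1, 1, 1, 2  # f(0), f(1), f(2), f(3)
--     for _ in range(4, N + 1):
--         a, b, c, d = b, c, d, d + b + a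
--     return d
-- ===== Notes on version B (the rewrite author's own statement) =====
-- stated objective: faster
-- what changed: Replaces the triple-branching recursion with a bottom-up rolling-window DP keeping only the last four values in one loop; intended as asymptotically faster (a timing run saw A time out where B returned but could not measure a ratio); Pre_ excludes negative N, where A recurses without reaching a base case and raises RecursionError.
import Mathlib
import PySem

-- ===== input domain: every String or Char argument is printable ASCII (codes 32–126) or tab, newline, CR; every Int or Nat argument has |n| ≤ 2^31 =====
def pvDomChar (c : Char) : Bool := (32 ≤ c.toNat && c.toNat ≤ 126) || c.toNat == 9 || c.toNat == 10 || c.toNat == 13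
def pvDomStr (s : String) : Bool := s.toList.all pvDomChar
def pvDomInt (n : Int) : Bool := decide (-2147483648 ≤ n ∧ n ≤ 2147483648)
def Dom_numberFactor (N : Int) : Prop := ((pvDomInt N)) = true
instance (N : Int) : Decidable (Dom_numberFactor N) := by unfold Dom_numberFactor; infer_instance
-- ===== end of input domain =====

-- B replaces A's exponential triple recursion with a bottom-up rolling-window DP (intended as asymptotically faster; a timing run saw A time out where B returned but could not measure a ratio).

-- ===== PORT A =====
-- A's recursion, expressed on the nonnegative part of Int via Nat structural recursion
-- (Pre_ restricts to nonnegative N, where this is exactly A; on negative N Python A raises RecursionError).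
def numberFactorAux : Nat → Int
  | 0 => 1
  | 1 => 1
  | 2 => 1
  | 3 => 2
  | (n + 4) =>
      let c1 := numberFactorAux (n + 3)
      let c2 := numberFactorAux (n + 1)
      let c3 := numberFactorAux n
      c1 + c2 + c3

def numberFactor (N : Int) : Int := numberFactorAux N.toNat

-- ===== PORT B =====
-- one step of the rolling-window update: (a,b,c,d) ↦ (b,c,d,d+b+a)
def nfStep : Int × Int × Int × Int → Int × Int × Int × Int
  | (a, b, c, d) => (b, c, d, d + b + a)

def nfLoop : Nat → Int × Int × Int × Int → Int × Int × Int × Int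
  | 0, s => s
  | (k + 1), s => nfLoop k (nfStep s)

def numberFactor_alt (N : Int) : Int :=
  if N ≤ 2 then 1
  else if N = 3 then 2
  else (nfLoop (N.toNat - 3) (1, 1, 1, 2)).2.2.2

-- ===== PRECONDITION & SPEC =====
-- Pre_ excludes negative N, on which Python A recurses forever downward and raises RecursionError.
def Pre_numberFactor (N : Int) : Prop := 0 ≤ N
instance (N : Int) : Decidable (Pre_numberFactor N) := by unfold Pre_numberFactor; infer_instance
def pvWitness_numberFactor : Int := (7)
def Spec_numberFactor (N : Int) (out : Int) : Prop := out = numberFactor_alt N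
instance (N : Int) (out : Int) : Decidable (Spec_numberFactor N out) := by unfold Spec_numberFactor; infer_instance

-- ===== CLAIM (what is proved, stated in full; the proofs are below) =====
def Claim_equal_numberFactor : Prop := ∀ (N : Int), Dom_numberFactor N → Pre_numberFactor N → Spec_numberFactor N (numberFactor N)

-- ===== LEMMAS AND PROOFS =====

-- loop invariant: after k steps the window holds f k, f (k+1), f (k+2), f (k+3)
theorem nfLoop_window (k : Nat) :
    nfLoop k (1, 1, 1, 2) =
      (numberFactorAux k, numberFactorAux (k + 1), numberFactorAux (k + 2), numberFactorAux (k + 3)) := by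
  have h : ∀ k j, nfLoop k (numberFactorAux j, numberFactorAux (j + 1),
      numberFactorAux (j + 2), numberFactorAux (j + 3)) =
      (numberFactorAux (j + k), numberFactorAux (j + k + 1),
       numberFactorAux (j + k + 2), numberFactorAux (j + k + 3)) := by
    intro k
    induction k with
    | zero => intro j; simp [nfLoop]
    | succ n ih =>
        intro j
        have hstep : nfStep (numberFactorAux j, numberFactorAux (j + 1),
            numberFactorAux (j + 2), numberFactorAux (j + 3)) =
            (numberFactorAux (j + 1), numberFactorAux (j + 2),
             numberFactorAux (j + 3), numberFactorAux (j + 4)) := by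
          show _ = (_, _, _, numberFactorAux (j + 4))
          simp [nfStep, numberFactorAux]
        rw [nfLoop, hstep, ih (j + 1)]
        ring_nf
  have := h k 0
  simpa using this
-- ===== VERDICT (by name: the statement is the Claim_ definition above) =====
theorem numberFactor_spec : Claim_equal_numberFactor := by
  intro N _ hpre
  unfold Spec_numberFactor numberFactor numberFactor_alt
  by_cases h2 : N ≤ 2
  · have : N.toNat = 0 ∨ N.toNat = 1 ∨ N.toNat = 2 := by omega
    rcases this with h | h | h <;> simp [h, h2, numberFactorAux]
  · by_cases h3 : N = 3
    · simp [h3, numberFactorAux]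
    · have h4 : 4 ≤ N.toNat := by omega
      simp only [if_neg h2, if_neg h3]
      rw [nfLoop_window]
      have : N.toNat - 3 + 3 = N.toNat := by omega
      simp [this]
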